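-- pv_equiv track=rewrite | github.com/DafitiSprint/dojos | 2014-09-17/seq5.py | findGreatestVerticalSequence
-- ===== SOURCE A (Python) =====
-- def findGreatestVerticalSequence(matrix=[]):
--     productory = 1
--     greatestSequence = 0
--     for positionY in range(len(matrix)):
--         for positionX in range(len(matrix)):
--             productory *= matrix[positionX][positionY]
--         if productory > greatestSequence:
--             greatestSequence = productory
--
--         productory = 1
--
--     return greatestSequence
-- ===== SOURCE B (Python) =====
-- def findGreatestVerticalSequence(matrix=[]):
--     products = [1] * len(matrix)
--     for x in range(len(matrix)):
--         for y in range(len(matrix)):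
--             products[y] *= matrix[x][y]
--     return max([0] + products)
-- ===== Notes on version B (the rewrite author's own statement) =====
-- stated objective: alternative
-- what changed: B keeps one running product per column in an array and updates all of them in a single row-major pass over the matrix, then takes max([0]+products), instead of A's column-major loop that recomputes a scalar accumulator per column and tracks the maximum on the fly.
import Mathlib
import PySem

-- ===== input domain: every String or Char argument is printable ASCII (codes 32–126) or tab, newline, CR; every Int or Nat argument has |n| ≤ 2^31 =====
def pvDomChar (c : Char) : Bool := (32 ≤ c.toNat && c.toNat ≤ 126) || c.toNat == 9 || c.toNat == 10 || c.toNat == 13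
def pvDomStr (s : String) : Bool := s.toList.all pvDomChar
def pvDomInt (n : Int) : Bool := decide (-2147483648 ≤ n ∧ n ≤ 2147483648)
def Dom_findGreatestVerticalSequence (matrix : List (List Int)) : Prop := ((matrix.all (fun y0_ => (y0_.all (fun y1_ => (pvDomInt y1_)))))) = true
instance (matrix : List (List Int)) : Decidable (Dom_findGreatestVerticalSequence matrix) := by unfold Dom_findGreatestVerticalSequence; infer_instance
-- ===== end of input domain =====

-- B maintains one running product per column in an array over a single row-major pass
-- (instead of A's per-column scalar accumulator); same value, same cost (objective: alternative).

-- ===== PORT A =====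
def findGreatestVerticalSequence (matrix : List (List Int)) : Int :=
  -- for positionY in range(len(matrix)): for positionX in ...: productory *= matrix[positionX][positionY]
  (PySem.List.pyRange 0 (matrix.length : Int) 1).foldl
    (fun greatestSequence positionY =>
      let productory :=
        (PySem.List.pyRange 0 (matrix.length : Int) 1).foldl
          (fun productory positionX =>
            productory * PySem.List.pyGetD (PySem.List.pyGetD matrix positionX []) positionY 0)
          1
      if productory > greatestSequence then productory else greatestSequence)
    0

-- ===== PORT B =====
def findGreatestVerticalSequence_alt (matrix : List (List Int)) : Int :=
  -- products = [1]*n; for x: for y: products[y] *= matrix[x][y]; return max([0] + products)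
  let products :=
    (PySem.List.pyRange 0 (matrix.length : Int) 1).foldl
      (fun ps x =>
        (PySem.List.pyRange 0 (matrix.length : Int) 1).foldl
          (fun ps y =>
            PySem.List.pySetD ps y
              (PySem.List.pyGetD ps y 1 *
                PySem.List.pyGetD (PySem.List.pyGetD matrix x []) y 0))
          ps)
      (List.replicate matrix.length (1 : Int))
  ((0 : Int) :: products).foldl max 0

-- ===== PRECONDITION & SPEC =====
-- Pre_ excludes exactly the ragged matrices on which Python A raises IndexError
-- (some row shorter than the number of rows); both A and B raise there.
def Pre_findGreatestVerticalSequence (matrix : List (List Int)) : Prop :=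
  ∀ row ∈ matrix, matrix.length ≤ row.length
instance (matrix : List (List Int)) : Decidable (Pre_findGreatestVerticalSequence matrix) := by
  unfold Pre_findGreatestVerticalSequence; infer_instance
def pvWitness_findGreatestVerticalSequence : List (List Int) := [[1, 2], [3, 4]]

def Spec_findGreatestVerticalSequence (matrix : List (List Int)) (out : Int) : Prop := out = findGreatestVerticalSequence_alt matrix
instance (matrix : List (List Int)) (out : Int) : Decidable (Spec_findGreatestVerticalSequence matrix out) := by unfold Spec_findGreatestVerticalSequence; infer_instance

-- ===== CLAIM (what is proved, stated in full; the proofs are below) =====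
def Claim_equal_findGreatestVerticalSequence : Prop := ∀ (matrix : List (List Int)), Dom_findGreatestVerticalSequence matrix → Pre_findGreatestVerticalSequence matrix → Spec_findGreatestVerticalSequence matrix (findGreatestVerticalSequence matrix)

-- ===== LEMMAS AND PROOFS =====

-- column product of column y over the rows of `matrix`
def pvColProd (matrix : List (List Int)) (y : Nat) : Int :=
  matrix.foldl (fun p row => p * row.getD y 0) 1

-- one row-step of B: multiply every column product by this row's entry
def pvStepRow (n : Nat) (ps row : List Int) : List Int :=
  (List.range n).foldl (fun ps y => ps.set y (ps.getD y 1 * row.getD y 0)) ps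

theorem pv_inner_length (m : Nat) (ps row : List Int) :
    ((List.range m).foldl (fun ps y => ps.set y (ps.getD y 1 * row.getD y 0)) ps).length
      = ps.length := by
  induction m generalizing ps with
  | zero => simp
  | succ m ih =>
    rw [List.range_succ, List.foldl_append, List.foldl_cons, List.foldl_nil,
      List.length_set, ih]

theorem pv_inner_getD (m : Nat) (ps row : List Int) (hm : m ≤ ps.length) (j : Nat) :
    ((List.range m).foldl (fun ps y => ps.set y (ps.getD y 1 * row.getD y 0)) ps).getD j 1
      = if j < m then ps.getD j 1 * row.getD j 0 else ps.getD j 1 := by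
  induction m with
  | zero => simp
  | succ m ih =>
    rw [List.range_succ, List.foldl_append]
    have hlen := pv_inner_length m ps row
    simp only [List.foldl_cons, List.foldl_nil]
    rw [List.getD_eq_getElem?_getD, List.getElem?_set]
    by_cases hj : m = j
    · subst hj
      have h1 : m < ((List.range m).foldl (fun ps y => ps.set y (ps.getD y 1 * row.getD y 0)) ps).length := by omega
      simp only [if_pos h1]
      rw [ih (by omega)]
      simp
    · rw [if_neg hj, ← List.getD_eq_getElem?_getD, ih (by omega)]
      split_ifs <;> first | rfl | omega

theorem pv_stepRow_length (n : Nat) (ps row : List Int) :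
    (pvStepRow n ps row).length = ps.length := pv_inner_length n ps row

theorem pv_outer (rs : List (List Int)) (n : Nat) (ps : List Int) (hps : ps.length = n)
    (j : Nat) (hj : j < n) :
    (rs.foldl (pvStepRow n) ps).getD j 1
      = rs.foldl (fun p row => p * row.getD j 0) (ps.getD j 1) := by
  induction rs generalizing ps with
  | nil => rfl
  | cons r rs ih =>
    simp only [List.foldl_cons]
    rw [ih _ (by rw [pv_stepRow_length]; exact hps)]
    congr 1
    rw [pvStepRow, pv_inner_getD n ps r (by omega), if_pos hj]

theorem pv_outer_length (rs : List (List Int)) (n : Nat) (ps : List Int) (hps : ps.length = n) :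
    (rs.foldl (pvStepRow n) ps).length = n := by
  induction rs generalizing ps with
  | nil => exact hps
  | cons r rs ih => simp only [List.foldl_cons]; exact ih _ (by rw [pv_stepRow_length]; exact hps)

theorem pv_products_eq (matrix : List (List Int)) :
    matrix.foldl (pvStepRow matrix.length) (List.replicate matrix.length 1)
      = (List.range matrix.length).map (pvColProd matrix) := by
  apply List.ext_getElem
  · rw [pv_outer_length _ _ _ (List.length_replicate)]; simp
  · intro j h1 h2
    have hj : j < matrix.length := by
      have := pv_outer_length matrix matrix.length (List.replicate matrix.length 1)
        List.length_replicate
      omega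
    have := pv_outer matrix matrix.length (List.replicate matrix.length 1)
      List.length_replicate j hj
    rw [List.getD_eq_getElem?_getD, List.getElem?_eq_getElem h1] at this
    simp only [Option.getD_some] at this
    rw [this]
    simp [pvColProd, List.getD_eq_getElem?_getD, hj]

theorem pv_alt_eq (matrix : List (List Int)) :
    findGreatestVerticalSequence_alt matrix
      = (List.range matrix.length).foldl
          (fun g y => max g (pvColProd matrix y)) 0 := by
  unfold findGreatestVerticalSequence_alt
  simp only [PySem.List.pyRange_zero_natCast, List.foldl_map,
    PySem.List.pySetD_natCast, PySem.List.pyGetD_natCast]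
  rw [show (fun (ps : List Int) (x : Nat) =>
        (List.range matrix.length).foldl
          (fun ps y => ps.set y (ps.getD y 1 * (matrix.getD x []).getD y 0)) ps)
      = (fun ps x => pvStepRow matrix.length ps (matrix.getD x [])) from rfl]
  rw [show (List.foldl (fun ps x => pvStepRow matrix.length ps (matrix.getD x []))
        (List.replicate matrix.length 1) (List.range matrix.length))
      = matrix.foldl (pvStepRow matrix.length) (List.replicate matrix.length 1) from ?_]
  · rw [pv_products_eq]
    simp only [List.foldl_cons, List.foldl_map, max_self]
  · have := PySem.List.foldl_pyRange_zero_pyGetD' matrix ([] : List Int)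
      (pvStepRow matrix.length) (List.replicate matrix.length (1 : Int))
    rw [PySem.List.pyRange_zero_natCast, List.foldl_map] at this
    simpa [PySem.List.pyGetD_natCast] using this

theorem pv_foldl_range_getD {α β : Type} (xs : List α) (d : α) (f : β → α → β) (init : β) :
    (List.range xs.length).foldl (fun acc x => f acc (xs.getD x d)) init = xs.foldl f init := by
  have := PySem.List.foldl_pyRange_zero_pyGetD' xs d f init
  rw [PySem.List.pyRange_zero_natCast, List.foldl_map] at this
  simpa [PySem.List.pyGetD_natCast] using this

theorem pv_a_eq (matrix : List (List Int)) :
    findGreatestVerticalSequence matrix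
      = (List.range matrix.length).foldl
          (fun g y => max g (pvColProd matrix y)) 0 := by
  unfold findGreatestVerticalSequence
  simp only [PySem.List.pyRange_zero_natCast, List.foldl_map, PySem.List.pyGetD_natCast]
  apply PySem.List.foldl_congr_mem
  intro acc y _
  simp only [pv_foldl_range_getD matrix ([] : List Int)
    (fun prod row => prod * row.getD y 0) 1]
  rw [← pvColProd]
  by_cases h : pvColProd matrix y ≤ acc <;> simp [max_def, h]; omega

-- ===== VERDICT (by name: the statement is the Claim_ definition above) =====
theorem findGreatestVerticalSequence_spec : Claim_equal_findGreatestVerticalSequence := by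
  intro matrix _ _
  unfold Spec_findGreatestVerticalSequence
  rw [pv_a_eq, pv_alt_eq]
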